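-- pv_equiv track=rewrite | github.com/LucasWong02/Analizador_sintactico | cfg_analyzer.py | find_unreachable
-- ===== SOURCE A (Python) =====
-- def find_unreachable(cfg, start_symbol):
--     reachable = set()
--     worklist = [start_symbol]
--
--     while worklist:
--         current = worklist.pop()
--         if current in reachable:
--             continue
--         reachable.add(current)
--         for production in cfg.get(current, []):
--             for symbol in production.split():
--                 if symbol in cfg:
--                     worklist.append(symbol)
--
--     return set(cfg.keys()) - reachable
-- ===== SOURCE B (Python) =====
-- def find_unreachable(cfg, start_symbol):
--     reachable = {start_symbol}
--     while True:
--         additions = {s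
--                      for sym in reachable
--                      for production in cfg.get(sym, [])
--                      for s in production.split()
--                      if s in cfg}
--         if additions <= reachable:
--             return set(cfg.keys()) - reachable
--         reachable |= additions
-- ===== Notes on version B (the rewrite author's own statement) =====
-- stated objective: alternative
-- what changed: A's explicit LIFO worklist traversal is replaced by a round-based fixpoint saturation: B repeatedly computes the one-step successor set of the whole current reachable set and unions it in until nothing new appears, then subtracts from the keys.
import Mathlib
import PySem

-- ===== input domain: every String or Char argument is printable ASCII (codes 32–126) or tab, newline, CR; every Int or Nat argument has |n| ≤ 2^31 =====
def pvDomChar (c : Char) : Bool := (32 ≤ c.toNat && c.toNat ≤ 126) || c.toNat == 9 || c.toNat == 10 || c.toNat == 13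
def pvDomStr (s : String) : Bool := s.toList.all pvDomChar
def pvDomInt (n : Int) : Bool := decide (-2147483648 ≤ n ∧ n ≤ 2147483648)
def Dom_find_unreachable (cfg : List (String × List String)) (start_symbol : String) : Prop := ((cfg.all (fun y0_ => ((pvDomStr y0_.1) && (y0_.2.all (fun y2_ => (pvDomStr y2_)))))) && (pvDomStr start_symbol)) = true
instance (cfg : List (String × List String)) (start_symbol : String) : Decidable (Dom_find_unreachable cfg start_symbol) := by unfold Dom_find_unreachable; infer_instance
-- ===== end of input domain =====

-- B replaces A's explicit LIFO worklist by a round-based fixpoint saturation (recompute the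
-- one-step successors of the whole reachable set and union them in until nothing new appears);
-- objective: alternative decomposition, not faster.

-- ===== PORT A =====
-- cfg (an association list under the type convention) viewed as the Python dict
def pvDict (cfg : List (String × List String)) : PySem.Dict String (List String) := ⟨cfg⟩

-- the symbols one iteration of A's inner two loops appends for `current`
def pvPushes (cfg : List (String × List String)) (current : String) : List String :=
  (PySem.Dict.getD (pvDict cfg) current []).flatMap
    (fun production => (PySem.Str.split₀ production).filter (fun symbol => PySem.Dict.contains (pvDict cfg) symbol))

-- termination measure: number of cfg keys not yet in `reachable`
def pvMissing (cfg : List (String × List String)) (reachable : PySem.Set String) : Nat :=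
  ((PySem.Dict.keys (pvDict cfg)).filter (fun k => !(PySem.Set.contains reachable k))).length

theorem pvFilterLe {α : Type} {l : List α} {p q : α → Bool}
    (himp : ∀ a, p a = true → q a = true) :
    (l.filter p).length ≤ (l.filter q).length := by
  induction l with
  | nil => simp
  | cons a l ih =>
    cases hp : p a with
    | true => have := ih; simp [List.filter, hp, himp a hp]; omega
    | false =>
      cases hq : q a with
      | true => have := ih; simp [List.filter, hp, hq]; omega
      | false => simpa [List.filter, hp, hq] using ih

theorem pvFilterLt {α : Type} {l : List α} {p q : α → Bool}
    (himp : ∀ a, p a = true → q a = true) {x : α}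
    (hx : x ∈ l) (hqx : q x = true) (hpx : p x = false) :
    (l.filter p).length < (l.filter q).length := by
  induction l with
  | nil => cases hx
  | cons a l ih =>
    rcases List.mem_cons.mp hx with rfl | hx'
    · have hle := pvFilterLe (l := l) himp
      have e1 : (List.filter p (x :: l)).length = (List.filter p l).length := by
        simp [hpx]
      have e2 : (List.filter q (x :: l)).length = (List.filter q l).length + 1 := by
        simp [hqx]
      omega
    · cases hp : p a with
      | true => have := ih hx'; simp [List.filter, hp, himp a hp]; omega
      | false =>
        cases hq : q a with
        | true => have := ih hx'; simp [List.filter, hp, hq]; omega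
        | false => simpa [List.filter, hp, hq] using ih hx'

theorem pvMissing_lt (cfg : List (String × List String)) {r r' : PySem.Set String}
    (hsub : ∀ k, k ∈ r → k ∈ r') {x : String}
    (hxk : x ∈ PySem.Dict.keys (pvDict cfg)) (hxr' : x ∈ r') (hxr : x ∉ r) :
    pvMissing cfg r' < pvMissing cfg r := by
  apply pvFilterLt (x := x)
  · intro a ha
    have ha' : a ∉ r' := by
      intro h; rw [(PySem.Set.contains_iff r' a).mpr h] at ha; simp at ha
    have : a ∉ r := fun h => ha' (hsub a h)
    simp [PySem.Set.contains, List.contains_eq_mem, this]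
  · exact hxk
  · simp [PySem.Set.contains, List.contains_eq_mem, hxr]
  · simp [PySem.Set.contains, List.contains_eq_mem, hxr']

-- the worklist is held TOP-OF-STACK FIRST (reversed w.r.t. the Python list): Python's
-- .pop() is taking the head here, and one iteration's .append()s push the batch reversed.
def pvLoopA (cfg : List (String × List String)) (reachable : PySem.Set String)
    (worklist : List String) : PySem.Set String :=
  match worklist with
  | [] => reachable
  | current :: rest =>
    if h : PySem.Set.contains reachable current = true then
      pvLoopA cfg reachable rest
    else
      pvLoopA cfg (PySem.Set.add reachable current) ((pvPushes cfg current).reverse ++ rest)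
termination_by (pvMissing cfg reachable, worklist.length)
decreasing_by
  · apply Prod.Lex.right; simp
  · by_cases hk : PySem.Dict.contains (pvDict cfg) current = true
    · apply Prod.Lex.left
      refine pvMissing_lt cfg (fun k hk' => (PySem.Set.mem_add _ _ _).mpr (Or.inl hk'))
        ((PySem.Dict.contains_iff_mem_keys (pvDict cfg) current).mp hk)
        ((PySem.Set.mem_add _ _ _).mpr (Or.inr rfl)) ?_
      intro hmem; exact h ((PySem.Set.contains_iff _ _).mpr hmem)
    · have hget : PySem.Dict.getD (pvDict cfg) current ([] : List String) = [] :=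
        PySem.Dict.getD_of_not_contains (pvDict cfg) [] (by simpa using hk)
      have hp : pvPushes cfg current = [] := by simp [pvPushes, hget]
      have hm : pvMissing cfg (PySem.Set.add reachable current) = pvMissing cfg reachable := by
        unfold pvMissing
        congr 1
        apply List.filter_congr
        intro k hkmem
        have hne : k ≠ current := by
          rintro rfl
          exact hk ((PySem.Dict.contains_iff_mem_keys (pvDict cfg) k).mpr hkmem)
        have : (PySem.Set.add reachable current).contains k = reachable.contains k := by
          cases hc : reachable.contains k with
          | true =>
            have : k ∈ reachable := (PySem.Set.contains_iff _ _).mp hc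
            exact (PySem.Set.contains_iff _ _).mpr ((PySem.Set.mem_add _ _ _).mpr (Or.inl this))
          | false =>
            have hkr : k ∉ reachable := fun h' => by
              rw [(PySem.Set.contains_iff _ _).mpr h'] at hc; simp at hc
            have : k ∉ PySem.Set.add reachable current := by
              intro h'
              rcases (PySem.Set.mem_add _ _ _).mp h' with h'' | h''
              · exact hkr h''
              · exact hne h''
            simp [PySem.Set.contains, List.contains_eq_mem, this]
        rw [this]
      rw [hm, hp]
      apply Prod.Lex.right; simp

def find_unreachable (cfg : List (String × List String)) (start_symbol : String) : List String :=
  PySem.Set.diff (PySem.Set.ofList (PySem.Dict.keys (pvDict cfg)))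
    (pvLoopA cfg PySem.Set.empty [start_symbol])

-- ===== PORT B =====
-- additions = {s for sym in reachable for production in cfg.get(sym, []) for s in production.split() if s in cfg}
def pvExpand (cfg : List (String × List String)) (reachable : PySem.Set String) : PySem.Set String :=
  reachable.foldl
    (fun additions sym =>
      (PySem.Dict.getD (pvDict cfg) sym []).foldl
        (fun additions production =>
          PySem.Set.update additions
            ((PySem.Str.split₀ production).filter (fun s => PySem.Dict.contains (pvDict cfg) s)))
        additions)
    PySem.Set.empty

theorem pvMemFoldl {α β : Type} [BEq α] [LawfulBEq α]
    (F : PySem.Set α → β → PySem.Set α) (P : β → α → Prop)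
    (hF : ∀ s b y, y ∈ F s b ↔ y ∈ s ∨ P b y) (l : List β) (s : PySem.Set α) (y : α) :
    y ∈ l.foldl F s ↔ y ∈ s ∨ ∃ b ∈ l, P b y := by
  induction l generalizing s with
  | nil => simp
  | cons b l ih =>
    rw [List.foldl_cons, ih, hF]
    constructor
    · rintro ((h | h) | ⟨c, hc, hPc⟩)
      · exact Or.inl h
      · exact Or.inr ⟨b, List.mem_cons_self, h⟩
      · exact Or.inr ⟨c, List.mem_cons_of_mem _ hc, hPc⟩
    · rintro (h | ⟨c, hc, hPc⟩)
      · exact Or.inl (Or.inl h)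
      · rcases List.mem_cons.mp hc with rfl | hc'
        · exact Or.inl (Or.inr hPc)
        · exact Or.inr ⟨c, hc', hPc⟩

theorem pvExpand_mem (cfg : List (String × List String)) (r : PySem.Set String) (y : String) :
    y ∈ pvExpand cfg r ↔ ∃ sym ∈ r, y ∈ pvPushes cfg sym := by
  unfold pvExpand
  refine Iff.trans (pvMemFoldl _ (fun sym y => y ∈ pvPushes cfg sym) ?_ r PySem.Set.empty y) ?_
  · intro s b z
    refine Iff.trans (pvMemFoldl _
      (fun production z =>
        z ∈ (PySem.Str.split₀ production).filter (fun s => PySem.Dict.contains (pvDict cfg) s))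
      (fun s p z => PySem.Set.mem_update s _ z) _ s z) ?_
    unfold pvPushes
    simp [List.mem_flatMap]
  · simp [PySem.Set.empty]

theorem pvPushes_keys (cfg : List (String × List String)) {a y : String}
    (h : y ∈ pvPushes cfg a) : y ∈ PySem.Dict.keys (pvDict cfg) := by
  unfold pvPushes at h
  obtain ⟨p, _, hy⟩ := List.mem_flatMap.mp h
  have := (List.mem_filter.mp hy).2
  exact (PySem.Dict.contains_iff_mem_keys (pvDict cfg) y).mp (by simpa using this)

def pvLoopB (cfg : List (String × List String)) (reachable : PySem.Set String) :
    PySem.Set String :=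
  if h : PySem.Set.issubset (pvExpand cfg reachable) reachable = true then
    reachable
  else
    pvLoopB cfg (PySem.Set.union reachable (pvExpand cfg reachable))
termination_by pvMissing cfg reachable
decreasing_by
  have : ¬ ∀ x ∈ pvExpand cfg reachable, x ∈ reachable := by
    intro hall; exact h ((PySem.Set.issubset_iff _ _).mpr hall)
  push Not at this
  obtain ⟨x, hxe, hxr⟩ := this
  obtain ⟨sym, _, hxp⟩ := (pvExpand_mem cfg reachable x).mp hxe
  exact pvMissing_lt cfg
    (fun k hk => (PySem.Set.mem_union _ _ _).mpr (Or.inl hk))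
    (pvPushes_keys cfg hxp)
    ((PySem.Set.mem_union _ _ _).mpr (Or.inr hxe)) hxr

def find_unreachable_alt (cfg : List (String × List String)) (start_symbol : String) : List String :=
  PySem.Set.diff (PySem.Set.ofList (PySem.Dict.keys (pvDict cfg)))
    (pvLoopB cfg (PySem.Set.ofList [start_symbol]))

-- ===== PRECONDITION & SPEC =====
def Spec_find_unreachable (cfg : List (String × List String)) (start_symbol : String) (out : List String) : Prop := out = find_unreachable_alt cfg start_symbol
instance (cfg : List (String × List String)) (start_symbol : String) (out : List String) : Decidable (Spec_find_unreachable cfg start_symbol out) := by unfold Spec_find_unreachable; infer_instance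

-- ===== CLAIM (what is proved, stated in full; the proofs are below) =====
def Claim_equal_find_unreachable : Prop := ∀ (cfg : List (String × List String)) (start_symbol : String), Dom_find_unreachable cfg start_symbol → Spec_find_unreachable cfg start_symbol (find_unreachable cfg start_symbol)

-- ===== LEMMAS AND PROOFS =====

-- reachability along A's push edges
def pvReach (cfg : List (String × List String)) (a b : String) : Prop :=
  Relation.ReflTransGen (fun u v => v ∈ pvPushes cfg u) a b

theorem pvLoopA_sound (cfg : List (String × List String)) (r : PySem.Set String)
    (wl : List String) (x : String) :
    x ∈ pvLoopA cfg r wl → x ∈ r ∨ ∃ w ∈ wl, pvReach cfg w x := by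
  fun_induction pvLoopA cfg r wl with
  | case1 r => exact fun h => Or.inl h
  | case2 r current rest h ih =>
    intro hx
    rcases ih hx with h' | ⟨w, hw, hr⟩
    · exact Or.inl h'
    · exact Or.inr ⟨w, List.mem_cons_of_mem _ hw, hr⟩
  | case3 r current rest h ih =>
    intro hx
    rcases ih hx with h' | ⟨w, hw, hr⟩
    · rcases (PySem.Set.mem_add _ _ _).mp h' with h'' | heq
      · exact Or.inl h''
      · exact Or.inr ⟨current, List.mem_cons_self,
          by cases heq; exact Relation.ReflTransGen.refl⟩
    · rcases List.mem_append.mp hw with hw' | hw'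
      · exact Or.inr ⟨current, List.mem_cons_self,
          Relation.ReflTransGen.head (List.mem_reverse.mp hw') hr⟩
      · exact Or.inr ⟨w, List.mem_cons_of_mem _ hw', hr⟩

theorem pvLoopA_complete (cfg : List (String × List String)) (r : PySem.Set String)
    (wl : List String) :
    (∀ a ∈ r, ∀ b ∈ pvPushes cfg a, b ∈ r ∨ b ∈ wl) →
    (∀ y ∈ r, y ∈ pvLoopA cfg r wl) ∧ (∀ y ∈ wl, y ∈ pvLoopA cfg r wl) ∧
      (∀ a ∈ pvLoopA cfg r wl, ∀ b ∈ pvPushes cfg a, b ∈ pvLoopA cfg r wl) := by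
  fun_induction pvLoopA cfg r wl with
  | case1 r =>
    intro hinv
    refine ⟨fun y hy => hy, by simp, ?_⟩
    intro a ha b hb
    rcases hinv a ha b hb with h | h
    · exact h
    · cases h
  | case2 r current rest h ih =>
    intro hinv
    have hcur : current ∈ r := (PySem.Set.contains_iff _ _).mp h
    obtain ⟨h1, h2, h3⟩ := ih (by
      intro a ha b hb
      rcases hinv a ha b hb with h' | h'
      · exact Or.inl h'
      · rcases List.mem_cons.mp h' with rfl | h''
        · exact Or.inl hcur
        · exact Or.inr h'')
    refine ⟨h1, ?_, h3⟩
    intro y hy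
    rcases List.mem_cons.mp hy with rfl | hy'
    · exact h1 _ hcur
    · exact h2 _ hy'
  | case3 r current rest h ih =>
    intro hinv
    obtain ⟨h1, h2, h3⟩ := ih (by
      intro a ha b hb
      rcases (PySem.Set.mem_add _ _ _).mp ha with ha' | rfl
      · rcases hinv a ha' b hb with h' | h'
        · exact Or.inl ((PySem.Set.mem_add _ _ _).mpr (Or.inl h'))
        · rcases List.mem_cons.mp h' with rfl | h''
          · exact Or.inl ((PySem.Set.mem_add _ _ _).mpr (Or.inr rfl))
          · exact Or.inr (List.mem_append.mpr (Or.inr h''))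
      · exact Or.inr (List.mem_append.mpr (Or.inl (List.mem_reverse.mpr hb))))
    refine ⟨fun y hy => h1 _ ((PySem.Set.mem_add _ _ _).mpr (Or.inl hy)), ?_, h3⟩
    intro y hy
    rcases List.mem_cons.mp hy with rfl | hy'
    · exact h1 _ ((PySem.Set.mem_add _ _ _).mpr (Or.inr rfl))
    · exact h2 _ (List.mem_append.mpr (Or.inr hy'))

theorem pvLoopA_iff (cfg : List (String × List String)) (start x : String) :
    x ∈ pvLoopA cfg PySem.Set.empty [start] ↔ pvReach cfg start x := by
  constructor
  · intro h
    rcases pvLoopA_sound cfg _ _ x h with h' | ⟨w, hw, hr⟩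
    · simp [PySem.Set.empty] at h'
    · rcases List.mem_singleton.mp hw with rfl
      exact hr
  · intro h
    obtain ⟨h1, h2, h3⟩ := pvLoopA_complete cfg PySem.Set.empty [start]
      (by intro a ha; simp [PySem.Set.empty] at ha)
    induction h with
    | refl => exact h2 start (List.mem_singleton_self start)
    | tail hab hstep ih => exact h3 _ ih _ hstep

theorem pvLoopB_sound (cfg : List (String × List String)) (start : String)
    (r : PySem.Set String) :
    (∀ y ∈ r, pvReach cfg start y) → ∀ y ∈ pvLoopB cfg r, pvReach cfg start y := by
  fun_induction pvLoopB cfg r with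
  | case1 r _h => exact fun hr => hr
  | case2 r h ih =>
    intro hr
    apply ih
    intro z hz
    rcases (PySem.Set.mem_union _ _ _).mp hz with hz' | hz'
    · exact hr z hz'
    · obtain ⟨sym, hsym, hzp⟩ := (pvExpand_mem cfg r z).mp hz'
      exact Relation.ReflTransGen.tail (hr sym hsym) hzp

theorem pvLoopB_complete (cfg : List (String × List String)) (r : PySem.Set String) :
    (∀ y ∈ r, y ∈ pvLoopB cfg r) ∧
      (∀ a ∈ pvLoopB cfg r, ∀ b ∈ pvPushes cfg a, b ∈ pvLoopB cfg r) := by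
  fun_induction pvLoopB cfg r with
  | case1 r h =>
    refine ⟨fun y hy => hy, ?_⟩
    intro a ha b hb
    exact (PySem.Set.issubset_iff _ _).mp h b ((pvExpand_mem cfg r b).mpr ⟨a, ha, hb⟩)
  | case2 r h ih =>
    obtain ⟨h1, h2⟩ := ih
    exact ⟨fun y hy => h1 y ((PySem.Set.mem_union _ _ _).mpr (Or.inl hy)), h2⟩

theorem pvLoopB_iff (cfg : List (String × List String)) (start x : String) :
    x ∈ pvLoopB cfg (PySem.Set.ofList [start]) ↔ pvReach cfg start x := by
  constructor
  · intro h
    refine pvLoopB_sound cfg start _ ?_ x h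
    intro y hy
    rcases List.mem_singleton.mp ((PySem.Set.mem_ofList _ _).mp hy) with rfl
    exact Relation.ReflTransGen.refl
  · intro h
    obtain ⟨h1, h2⟩ := pvLoopB_complete cfg (PySem.Set.ofList [start])
    induction h with
    | refl => exact h1 start ((PySem.Set.mem_ofList _ _).mpr (List.mem_singleton_self start))
    | tail hab hstep ih => exact h2 _ ih _ hstep

-- ===== VERDICT (by name: the statement is the Claim_ definition above) =====
theorem find_unreachable_spec : Claim_equal_find_unreachable := by
  intro cfg start _hdom
  unfold Spec_find_unreachable find_unreachable find_unreachable_alt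
  simp only [PySem.Set.diff]
  apply List.filter_congr
  intro x _hx
  have hiff : x ∈ pvLoopA cfg PySem.Set.empty [start] ↔ x ∈ pvLoopB cfg (PySem.Set.ofList [start]) :=
    (pvLoopA_iff cfg start x).trans (pvLoopB_iff cfg start x).symm
  have hc : (pvLoopA cfg PySem.Set.empty [start]).contains x
      = (pvLoopB cfg (PySem.Set.ofList [start])).contains x := by
    by_cases hm : x ∈ pvLoopA cfg PySem.Set.empty [start]
    · rw [(PySem.Set.contains_iff _ _).mpr hm, (PySem.Set.contains_iff _ _).mpr (hiff.mp hm)]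
    · have hm' : x ∉ pvLoopB cfg (PySem.Set.ofList [start]) := fun h => hm (hiff.mpr h)
      have e1 : (pvLoopA cfg PySem.Set.empty [start]).contains x = false :=
        Bool.eq_false_iff.mpr (fun hc => hm ((PySem.Set.contains_iff _ _).mp hc))
      have e2 : (pvLoopB cfg (PySem.Set.ofList [start])).contains x = false :=
        Bool.eq_false_iff.mpr (fun hc => hm' ((PySem.Set.contains_iff _ _).mp hc))
      rw [e1, e2]
  rw [hc]
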